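-- pv_equiv track=rewrite | github.com/YuanRuiGao/cp1404practicals | prac_05/wimbledon.py | champions_information_statistics
-- ===== SOURCE A (Python) =====
-- def champions_information_statistics(wimbledon_information):
--     """Statistics of the champions and country"""
--
--     champions_information = {}
--     won_country = []
--     for i in wimbledon_information:
--         if wimbledon_information[i][1] in champions_information:
--             champions_information[wimbledon_information[i][1]] += 1
--         else:
--             champions_information[wimbledon_information[i][1]] = 1
--             if wimbledon_information[i][0] not in won_country:
--                 won_country.append(wimbledon_information[i][0])
--     won_country.sort()
--     return champions_information, won_country
-- ===== SOURCE B (Python) =====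
-- def champions_information_statistics(wimbledon_information):
--     """Statistics of the champions and country"""
--     rows = list(wimbledon_information.values())
--     names = [row[1] for row in rows]
--     champions_information = {name: names.count(name) for name in dict.fromkeys(names)}
--     won_country = sorted({row[0] for i, row in enumerate(rows) if row[1] not in names[:i]})
--     return champions_information, won_country
-- ===== Notes on version B (the rewrite author's own statement) =====
-- stated objective: alternative
-- what changed: B replaces A's single accumulator loop (incremental counter plus in-loop list-membership dedup) with staged declarative passes: an ordered dedup of the name list via dict.fromkeys, per-name totals computed by counting occurrences in the whole name list, and winning countries selected by a positional first-occurrence test of each row against the prefix of earlier names, sorted once at the end.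
import Mathlib
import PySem

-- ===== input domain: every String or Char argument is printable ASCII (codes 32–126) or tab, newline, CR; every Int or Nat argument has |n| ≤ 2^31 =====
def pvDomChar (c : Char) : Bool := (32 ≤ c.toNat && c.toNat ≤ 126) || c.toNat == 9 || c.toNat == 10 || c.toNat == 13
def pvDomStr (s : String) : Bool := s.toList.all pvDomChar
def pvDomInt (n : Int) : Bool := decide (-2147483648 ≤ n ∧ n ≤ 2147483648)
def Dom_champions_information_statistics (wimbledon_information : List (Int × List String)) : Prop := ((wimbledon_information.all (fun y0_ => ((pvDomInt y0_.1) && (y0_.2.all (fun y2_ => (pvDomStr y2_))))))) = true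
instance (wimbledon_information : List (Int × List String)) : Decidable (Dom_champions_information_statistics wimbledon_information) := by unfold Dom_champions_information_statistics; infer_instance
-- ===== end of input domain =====

-- B replaces A's single accumulator loop by staged declarative passes (ordered name dedup,
-- per-name totals via count, countries via a positional first-occurrence filter); objective: alternative.


-- ===== PORT A =====
-- wimbledon_information is a Python dict year -> [champion, country] (association list here).
-- A iterates its KEYS i and looks each value up as wimbledon_information[i]; under Pre_ (unique
-- keys) that lookup is exact.  v[1] keys the counter, v[0] feeds the deduped, sorted list.
def pvStepA (d : PySem.Dict Int (List String)) (st : PySem.Dict String Int × List String) (p : Int × List String) : PySem.Dict String Int × List String :=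
  let v := d.getD p.1 []                          -- wimbledon_information[i]
  let name := (PySem.List.pyGet? v 1).getD ""     -- v[1]; none = IndexError, excluded by Pre_
  if st.1.contains name then
    (st.1.insert name (st.1.getD name 0 + 1), st.2)
  else
    let country := (PySem.List.pyGet? v 0).getD ""
    (st.1.insert name 1, if st.2.contains country then st.2 else st.2 ++ [country])

def champions_information_statistics (wimbledon_information : List (Int × List String)) : (List (String × Int)) × List String :=
  let st := wimbledon_information.foldl (pvStepA (PySem.Dict.mk wimbledon_information)) (PySem.Dict.empty, [])
  (st.1.items, PySem.List.sorted st.2 (fun x => x) false)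

-- ===== PORT B =====
def pvNameOf (r : List String) : String := (PySem.List.pyGet? r 1).getD ""   -- row[1]; none = IndexError, excluded by Pre_

-- the set comprehension over rows — row 0-entries of rows whose row 1-entry does not occur among
-- earlier names — as the ordered list it iterates (Set.ofList is applied to it in the port)
def pvBCountries (rows : List (List String)) (names : List String) : List String :=
  ((PySem.List.enumerate rows 0).filter
      (fun q => !((PySem.List.slice names none (some q.1)).contains (pvNameOf q.2)))).map
    (fun q => (PySem.List.pyGet? q.2 0).getD "")

def champions_information_statistics_alt (wimbledon_information : List (Int × List String)) : (List (String × Int)) × List String :=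
  let rows := wimbledon_information.map (·.2)                    -- list(….values())
  let names := rows.map pvNameOf                                 -- the second entry of each row
  -- the dict comprehension mapping each name, deduped via dict.fromkeys, to its count in names;
  -- its keys are distinct, so its items are exactly this association list
  let champs := (PySem.List.dedup names).map (fun n => (n, (names.count n : Int)))
  let wc := PySem.Set.ofList (pvBCountries rows names)           -- the set comprehension
  (champs, PySem.List.sorted wc (fun x => x) false)

-- ===== PRECONDITION & SPEC =====
-- Pre_: unique keys (an association list with duplicate keys represents no Python dict), and
-- every value list has at least 2 entries — A raises IndexError at v[1] otherwise.
def Pre_champions_information_statistics (wimbledon_information : List (Int × List String)) : Prop :=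
  (wimbledon_information.map (·.1)).Nodup ∧ ∀ p ∈ wimbledon_information, 2 ≤ p.2.length
instance (wimbledon_information : List (Int × List String)) : Decidable (Pre_champions_information_statistics wimbledon_information) := by unfold Pre_champions_information_statistics; infer_instance
def pvWitness_champions_information_statistics : (List (Int × List String)) := [(2000, ["Federer", "Switzerland"]), (2001, ["Nadal", "Spain"])]

def Spec_champions_information_statistics (wimbledon_information : List (Int × List String)) (out : (List (String × Int)) × List String) : Prop := out = champions_information_statistics_alt wimbledon_information
instance (wimbledon_information : List (Int × List String)) (out : (List (String × Int)) × List String) : Decidable (Spec_champions_information_statistics wimbledon_information out) := by unfold Spec_champions_information_statistics; infer_instance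

-- ===== CLAIM (what is proved, stated in full; the proofs are below) =====
def Claim_equal_champions_information_statistics : Prop := ∀ (wimbledon_information : List (Int × List String)), Dom_champions_information_statistics wimbledon_information → Pre_champions_information_statistics wimbledon_information → Spec_champions_information_statistics wimbledon_information (champions_information_statistics wimbledon_information)

-- ===== LEMMAS AND PROOFS =====

-- A's per-key step with the lookup resolved: under unique keys, d[i] is the pair's own value.
def pvStepA' (st : PySem.Dict String Int × List String) (p : Int × List String) : PySem.Dict String Int × List String :=
  let name := pvNameOf p.2
  if st.1.contains name then
    (st.1.insert name (st.1.getD name 0 + 1), st.2)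
  else
    let country := (PySem.List.pyGet? p.2 0).getD ""
    (st.1.insert name 1, if st.2.contains country then st.2 else st.2 ++ [country])

theorem pvStepA_eq_pure (w : List (Int × List String)) (hnd : (w.map (·.1)).Nodup)
    (p : Int × List String) (hp : p ∈ w) (st : PySem.Dict String Int × List String) :
    pvStepA (PySem.Dict.mk w) st p = pvStepA' st p := by
  have hv : (PySem.Dict.mk w).getD p.1 [] = p.2 :=
    PySem.Dict.getD_of_mem_items (PySem.Dict.mk w) (by simpa using hp)
      (by simpa [PySem.Dict.keys] using hnd) []
  simp only [pvStepA, pvStepA', pvNameOf, hv]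

-- appending one row extends the first-occurrence country list by that row's country iff its name is new
theorem pvBCountries_append (rl : List (List String)) (nl : List String) (r : List String)
    (n : String) (hlen : nl.length = rl.length) :
    pvBCountries (rl ++ [r]) (nl ++ [n]) =
      pvBCountries rl nl ++
        (if nl.contains (pvNameOf r) then [] else [(PySem.List.pyGet? r 0).getD ""]) := by
  unfold pvBCountries
  rw [PySem.List.enumerate_append, List.filter_append, List.map_append]
  have hnew : PySem.List.enumerate [r] ((0 : Int) + rl.length) = [((rl.length : Int), r)] := by
    rw [PySem.List.enumerate_cons]; simp [PySem.List.enumerate_nil]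
  have hslice_new : PySem.List.slice (nl ++ [n]) none (some ((rl.length : Int))) = nl := by
    rw [PySem.List.slice_to_natCast]
    rw [← hlen, List.take_append_of_le_length (le_refl _), List.take_length]
  have hold : ∀ q ∈ PySem.List.enumerate rl (0 : Int),
      (!((PySem.List.slice (nl ++ [n]) none (some q.1)).contains (pvNameOf q.2))) =
      (!((PySem.List.slice nl none (some q.1)).contains (pvNameOf q.2))) := by
    intro q hq
    obtain ⟨k, hk, rfl⟩ := (PySem.List.mem_enumerate_iff rl 0 q).1 hq
    have hz : ((0 : Int) + k) = ((k : Int)) := by omega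
    rw [hz, PySem.List.slice_to_natCast, PySem.List.slice_to_natCast,
      List.take_append_of_le_length (by omega)]
  rw [List.filter_congr hold, hnew]
  by_cases hmem : pvNameOf r ∈ nl
  · simp [List.filter, hslice_new, hmem]
  · simp [List.filter, hslice_new, hmem]

-- loop characterisation: A's fold is the counter of the name list paired with the set of
-- first-occurrence countries
theorem pvFoldA_eq (w : List (Int × List String)) :
    w.foldl pvStepA' (PySem.Dict.empty, []) =
      (PySem.Dict.counter ((w.map (·.2)).map pvNameOf),
       PySem.Set.ofList (pvBCountries (w.map (·.2)) ((w.map (·.2)).map pvNameOf))) := by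
  induction w using List.reverseRecOn with
  | nil => simp [pvBCountries, PySem.List.enumerate_nil, PySem.Dict.counter]
  | append_singleton l p ih =>
    rw [List.foldl_append, List.foldl_cons, List.foldl_nil, ih]
    simp only [List.map_append, List.map_cons, List.map_nil]
    rw [pvBCountries_append _ _ _ _ (by simp)]
    have hcont : (PySem.Dict.counter ((l.map (·.2)).map pvNameOf)).contains (pvNameOf p.2) =
        ((l.map (·.2)).map pvNameOf).contains (pvNameOf p.2) :=
      PySem.Dict.contains_counter _ _
    have hfold : ∀ m : String,
        (PySem.Dict.counter ((l.map (·.2)).map pvNameOf)).insert m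
            ((PySem.Dict.counter ((l.map (·.2)).map pvNameOf)).getD m 0 + 1) =
          PySem.Dict.counter ((l.map (·.2)).map pvNameOf ++ [m]) := by
      intro m
      rw [← PySem.Dict.foldl_insert_getD_add_one_eq_counter,
        ← PySem.Dict.foldl_insert_getD_add_one_eq_counter, List.foldl_append,
        List.foldl_cons, List.foldl_nil]
    by_cases hm : ((l.map (·.2)).map pvNameOf).contains (pvNameOf p.2) = true
    · -- seen name: counter bumps, country list unchanged
      have hcf : (PySem.Dict.counter ((l.map (·.2)).map pvNameOf)).contains (pvNameOf p.2) = true :=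
        hcont.trans hm
      simp only [pvStepA', hcf, if_true, Prod.mk.injEq]
      refine ⟨hfold _, ?_⟩
      rw [hm]; simp
    · -- new name: counter gains the key with value 1, country set gains the country
      have hm' : ((l.map (·.2)).map pvNameOf).contains (pvNameOf p.2) = false := by
        simpa using hm
      have hcf : (PySem.Dict.counter ((l.map (·.2)).map pvNameOf)).contains (pvNameOf p.2) = false := by
        rw [hcont, hm']
      have hgd : (PySem.Dict.counter ((l.map (·.2)).map pvNameOf)).getD (pvNameOf p.2) 0 = 0 :=
        PySem.Dict.getD_of_not_contains _ 0 hcf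
      simp only [pvStepA', hcf, Bool.false_eq_true, if_false, Prod.mk.injEq]
      refine ⟨by rw [← hfold _, hgd]; norm_num, ?_⟩
      rw [hm']
      simp only [Bool.false_eq_true, if_false]
      rw [PySem.Set.ofList_append_singleton, PySem.Set.add_eq_ite]
      by_cases hc : (PySem.List.pyGet? p.2 0).getD "" ∈
          PySem.Set.ofList (pvBCountries (l.map (·.2)) ((l.map (·.2)).map pvNameOf))
      · rw [if_pos (by simpa using hc), if_pos hc]
      · rw [if_neg (by simpa using hc), if_neg hc]

-- ===== VERDICT (by name: the statement is the Claim_ definition above) =====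
theorem champions_information_statistics_spec : Claim_equal_champions_information_statistics := by
  intro w _ hpre
  obtain ⟨hnd, _⟩ := hpre
  show _ = _
  simp only [champions_information_statistics, champions_information_statistics_alt]
  rw [PySem.List.foldl_congr_mem' w (pvStepA (PySem.Dict.mk w)) pvStepA'
    (PySem.Dict.empty, []) (fun p hp st => pvStepA_eq_pure w hnd p hp st)]
  rw [pvFoldA_eq w]
  simp [PySem.Dict.items_counter, PySem.List.dedup_eq_ofList]
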